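-- pv_equiv track=rewrite | github.com/maverick0o0/IDORMe | src/idorme/mutation_engine.py | _replace_query_value
-- ===== SOURCE A (Python) =====
-- def _replace_query_value(pairs, param, value):
--     pairs = list(pairs)
--     replaced = False
--     new_pairs = []
--     for key, current in pairs:
--         if not replaced and key == param:
--             new_pairs.append((key, value))
--             replaced = True
--         else:
--             new_pairs.append((key, current))
--     if not replaced:
--         new_pairs.append((param, value))
--     return new_pairs
-- ===== SOURCE B (Python) =====
-- def _replace_query_value(pairs, param, value):
--     pairs = list(pairs)
--     idx = next((i for i, (k, _) in enumerate(pairs) if k == param), None)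
--     if idx is None:
--         return pairs + [(param, value)]
--     result = list(pairs)
--     result[idx] = (param, value)
--     return result
-- ===== Notes on version B (the rewrite author's own statement) =====
-- stated objective: alternative
-- what changed: B locates the index of the first matching key once, then copies the list and overwrites that one slot (or appends if none), instead of A's build-as-you-go loop with a 'replaced' flag.
import Mathlib
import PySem

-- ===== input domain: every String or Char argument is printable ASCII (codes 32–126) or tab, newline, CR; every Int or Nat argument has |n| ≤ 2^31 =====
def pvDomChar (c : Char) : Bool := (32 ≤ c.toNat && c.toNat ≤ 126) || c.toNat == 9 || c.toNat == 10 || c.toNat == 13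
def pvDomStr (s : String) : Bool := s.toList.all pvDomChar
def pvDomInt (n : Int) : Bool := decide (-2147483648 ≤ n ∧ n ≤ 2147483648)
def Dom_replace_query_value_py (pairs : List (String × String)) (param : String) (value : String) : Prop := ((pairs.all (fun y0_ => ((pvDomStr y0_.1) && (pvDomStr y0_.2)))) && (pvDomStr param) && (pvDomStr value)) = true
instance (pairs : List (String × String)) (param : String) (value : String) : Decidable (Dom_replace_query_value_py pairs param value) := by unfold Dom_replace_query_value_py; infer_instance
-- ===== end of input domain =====

-- B replaces A's build-as-you-go loop with a `replaced` flag by locate-the-index-then-overwrite-one-slot; same cost, different decomposition.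

-- ===== PORT A =====
-- the loop: state = (replaced, new_pairs), appending one pair per iteration
def replace_query_value_py (pairs : List (String × String)) (param : String) (value : String) : List (String × String) :=
  let st := pairs.foldl (fun (st : Bool × List (String × String)) kv =>
    if !st.1 && kv.1 == param then (true, st.2 ++ [(kv.1, value)])
    else (st.1, st.2 ++ [kv])) (false, [])
  if !st.1 then st.2 ++ [(param, value)] else st.2

-- ===== PORT B =====
-- next((i for i,(k,_) in enumerate(pairs) if k == param), None) → List.findIdx?; result[idx] = … → List.set
def replace_query_value_py_alt (pairs : List (String × String)) (param : String) (value : String) : List (String × String) :=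
  match pairs.findIdx? (fun kv => kv.1 == param) with
  | none => pairs ++ [(param, value)]
  | some i => pairs.set i (param, value)

-- ===== PRECONDITION & SPEC =====
def Spec_replace_query_value_py (pairs : List (String × String)) (param : String) (value : String) (out : List (String × String)) : Prop := out = replace_query_value_py_alt pairs param value
instance (pairs : List (String × String)) (param : String) (value : String) (out : List (String × String)) : Decidable (Spec_replace_query_value_py pairs param value out) := by unfold Spec_replace_query_value_py; infer_instance

-- ===== CLAIM (what is proved, stated in full; the proofs are below) =====
def Claim_equal_replace_query_value_py : Prop := ∀ (pairs : List (String × String)) (param : String) (value : String), Dom_replace_query_value_py pairs param value → Spec_replace_query_value_py pairs param value (replace_query_value_py pairs param value)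

-- ===== LEMMAS AND PROOFS =====

-- once replaced, the loop just copies the remaining pairs
theorem aLoop_true (pairs : List (String × String)) (param value : String)
    (acc : List (String × String)) :
    pairs.foldl (fun (st : Bool × List (String × String)) kv =>
      if !st.1 && kv.1 == param then (true, st.2 ++ [(kv.1, value)])
      else (st.1, st.2 ++ [kv])) (true, acc) = (true, acc ++ pairs) := by
  induction pairs generalizing acc with
  | nil => simp
  | cons kv rest ih =>
    rw [List.foldl_cons, if_neg (by simp), ih]
    simp

-- before a match, the loop's result is determined by the first index with a matching key
theorem aLoop_false (pairs : List (String × String)) (param value : String)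
    (acc : List (String × String)) :
    pairs.foldl (fun (st : Bool × List (String × String)) kv =>
      if !st.1 && kv.1 == param then (true, st.2 ++ [(kv.1, value)])
      else (st.1, st.2 ++ [kv])) (false, acc) =
    (match pairs.findIdx? (fun kv => kv.1 == param) with
     | none => (false, acc ++ pairs)
     | some i => (true, acc ++ pairs.set i (param, value))) := by
  induction pairs generalizing acc with
  | nil => simp
  | cons kv rest ih =>
    rw [List.foldl_cons, List.findIdx?_cons]
    by_cases h : kv.1 = param
    · rw [if_pos (by simp [h]), aLoop_true]
      simp [h]
    · rw [if_neg (by simp [h]), ih]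
      cases hf : rest.findIdx? (fun kv => kv.1 == param) <;> simp [h]

-- ===== VERDICT (by name: the statement is the Claim_ definition above) =====
theorem replace_query_value_py_spec : Claim_equal_replace_query_value_py := by
  intro pairs param value _
  unfold Spec_replace_query_value_py replace_query_value_py replace_query_value_py_alt
  rw [aLoop_false]
  cases hf : pairs.findIdx? (fun kv => kv.1 == param) <;> simp
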